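-- pv_equiv track=rewrite | github.com/BrianGreenhill/adventofcode | 2015/day3/day3.py | get_visited
-- ===== SOURCE A (Python) =====
-- def get_visited(directions):
--     x = 0
--     y = 0
--     VISITED = set()
--     for i in range(len(directions)):
--         if directions[i] == '>':
--             x += 1
--         if directions[i] == '<':
--             x -= 1
--         if directions[i] == '^':
--             y += 1
--         if directions[i] == 'v':
--             y -= 1
--         coords = (x,y)
--         if coords not in VISITED:
--             VISITED.add(coords)
--     return VISITED
-- ===== SOURCE B (Python) =====
-- def get_visited(directions):
--     # Staged counting passes: the position after the i-th move is
--     # (#'>' - #'<', #'^' - #'v') within the first i+1 characters.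
--     def prefix_counts(ch):
--         total = 0
--         out = []
--         for c in directions:
--             total += (c == ch)
--             out.append(total)
--         return out
--
--     R = prefix_counts('>')
--     L = prefix_counts('<')
--     U = prefix_counts('^')
--     D = prefix_counts('v')
--     return {(r - l, u - d) for r, l, u, d in zip(R, L, U, D)}
-- ===== Notes on version B (the rewrite author's own statement) =====
-- stated objective: alternative
-- what changed: Instead of walking a mutable (x,y) state through the string, B computes four independent prefix-count sequences (one per direction character) and reconstructs each visited position as the count differences (#'>'-#'<', #'^'-#'v') over each prefix, collecting them into a set.
import Mathlib
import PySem

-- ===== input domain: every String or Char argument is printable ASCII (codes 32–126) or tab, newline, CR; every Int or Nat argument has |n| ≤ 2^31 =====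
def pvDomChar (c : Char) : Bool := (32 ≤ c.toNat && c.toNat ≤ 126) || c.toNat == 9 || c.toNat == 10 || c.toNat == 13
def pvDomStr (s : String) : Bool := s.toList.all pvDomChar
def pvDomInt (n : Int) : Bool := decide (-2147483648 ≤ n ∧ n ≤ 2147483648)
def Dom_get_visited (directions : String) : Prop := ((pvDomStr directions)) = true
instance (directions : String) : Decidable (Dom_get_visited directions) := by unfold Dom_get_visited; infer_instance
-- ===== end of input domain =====

-- B replaces A's single stateful walk (mutable x/y, four if-branches, visited set)
-- by four independent prefix-count passes, reconstructing each position as the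
-- count differences (#'>'-#'<', #'^'-#'v') per prefix; objective: alternative.

-- ===== PORT A =====
-- one iteration of A's loop body, applied to directions[i]
def pvStepA (st : Int × Int × PySem.Set (Int × Int)) (c : Char) :
    Int × Int × PySem.Set (Int × Int) :=
  let x := st.1
  let y := st.2.1
  let visited := st.2.2
  let x := if c == '>' then x + 1 else x
  let x := if c == '<' then x - 1 else x
  let y := if c == '^' then y + 1 else y
  let y := if c == 'v' then y - 1 else y
  let coords := (x, y)
  let visited := if !(PySem.Set.contains visited coords)
                 then PySem.Set.add visited coords else visited
  (x, y, visited)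

def get_visited (directions : String) : List (Int × Int) :=
  let cs := directions.toList
  let st := (PySem.List.pyRange 0 (PySem.List.len cs) 1).foldl
    (fun st i => pvStepA st (PySem.List.pyGetD cs i ' '))
    ((0 : Int), (0 : Int), (PySem.Set.empty : PySem.Set (Int × Int)))
  st.2.2

-- ===== PORT B =====
-- prefix_counts: running count of occurrences of ch, appended per character
def pvPrefixGo (ch : Char) (total : Int) : List Char → List Int
  | [] => []
  | c :: cs =>
    let total := total + (if c == ch then 1 else 0)
    total :: pvPrefixGo ch total cs

def pvPrefixCounts (ch : Char) (cs : List Char) : List Int :=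
  pvPrefixGo ch 0 cs

-- the set comprehension {(r-l, u-d) for r,l,u,d in zip(R,L,U,D)}
def pvZipSub : List Int → List Int → List Int → List Int → List (Int × Int)
  | r :: R, l :: L, u :: U, d :: D => (r - l, u - d) :: pvZipSub R L U D
  | _, _, _, _ => []

def get_visited_alt (directions : String) : List (Int × Int) :=
  let cs := directions.toList
  let R := pvPrefixCounts '>' cs
  let L := pvPrefixCounts '<' cs
  let U := pvPrefixCounts '^' cs
  let D := pvPrefixCounts 'v' cs
  PySem.Set.ofList (pvZipSub R L U D)

-- ===== PRECONDITION & SPEC =====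
def Spec_get_visited (directions : String) (out : List (Int × Int)) : Prop := out = get_visited_alt directions
instance (directions : String) (out : List (Int × Int)) : Decidable (Spec_get_visited directions out) := by unfold Spec_get_visited; infer_instance

-- ===== CLAIM (what is proved, stated in full; the proofs are below) =====
def Claim_equal_get_visited : Prop := ∀ (directions : String), Dom_get_visited directions → Spec_get_visited directions (get_visited directions)

-- ===== LEMMAS AND PROOFS =====

-- per-character delta of the walk
def pvDelta (c : Char) : Int × Int :=
  if c = '>' then (1, 0)
  else if c = '<' then (-1, 0)
  else if c = '^' then (0, 1)
  else if c = 'v' then (0, -1)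
  else (0, 0)

def pvAddT (p d : Int × Int) : Int × Int := (p.1 + d.1, p.2 + d.2)

-- positions reached from p by successively adding the per-character deltas
def pvPositions (p : Int × Int) : List Char → List (Int × Int)
  | [] => []
  | c :: cs => pvAddT p (pvDelta c) :: pvPositions (pvAddT p (pvDelta c)) cs

theorem pvStepA_pos (c : Char) (x y : Int) (V : PySem.Set (Int × Int)) :
    ((pvStepA (x, y, V) c).1, (pvStepA (x, y, V) c).2.1) =
      pvAddT (x, y) (pvDelta c) := by
  by_cases h1 : c = '>' <;> by_cases h2 : c = '<' <;> by_cases h3 : c = '^' <;>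
    by_cases h4 : c = 'v' <;> simp_all [pvStepA, pvAddT, pvDelta, sub_eq_add_neg]

theorem pvStepA_set (c : Char) (x y : Int) (V : PySem.Set (Int × Int)) :
    (pvStepA (x, y, V) c).2.2 =
      PySem.Set.add V ((pvStepA (x, y, V) c).1, (pvStepA (x, y, V) c).2.1) := by
  simp only [pvStepA, PySem.Set.add]
  split <;> simp_all

theorem pv_fold_inv (cs : List Char) (x y : Int) (V : PySem.Set (Int × Int)) :
    (cs.foldl pvStepA (x, y, V)).2.2 =
      List.foldl PySem.Set.add V (pvPositions (x, y) cs) := by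
  induction cs generalizing x y V with
  | nil => rfl
  | cons c cs ih =>
    have hp := pvStepA_pos c x y V
    have hs := pvStepA_set c x y V
    simp only [List.foldl, pvPositions]
    rw [← hp]
    have : pvStepA (x, y, V) c =
        ((pvStepA (x, y, V) c).1, (pvStepA (x, y, V) c).2.1, (pvStepA (x, y, V) c).2.2) := rfl
    rw [this, hs, ih]

-- the zipped count differences are exactly the walk positions
theorem pvZipSub_eq (cs : List Char) (rx lx uy dy : Int) :
    pvZipSub (pvPrefixGo '>' rx cs) (pvPrefixGo '<' lx cs)
             (pvPrefixGo '^' uy cs) (pvPrefixGo 'v' dy cs) =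
      pvPositions (rx - lx, uy - dy) cs := by
  induction cs generalizing rx lx uy dy with
  | nil => rfl
  | cons c cs ih =>
    simp only [pvPrefixGo, pvZipSub, pvPositions, ih]
    have hpos : (rx + (if c == '>' then (1:Int) else 0) - (lx + (if c == '<' then (1:Int) else 0)),
        uy + (if c == '^' then (1:Int) else 0) - (dy + (if c == 'v' then (1:Int) else 0))) =
        pvAddT (rx - lx, uy - dy) (pvDelta c) := by
      by_cases h1 : c = '>' <;> by_cases h2 : c = '<' <;> by_cases h3 : c = '^' <;>
        by_cases h4 : c = 'v' <;> simp_all [pvAddT, pvDelta] <;> ring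
    rw [hpos]

-- ===== VERDICT (by name: the statement is the Claim_ definition above) =====
theorem get_visited_spec : Claim_equal_get_visited := by
  intro directions _
  unfold Spec_get_visited get_visited get_visited_alt
  simp only []
  rw [PySem.List.foldl_pyRange_zero_pyGetD]
  rw [pv_fold_inv, PySem.Set.ofList_eq_foldl, pvPrefixCounts, pvPrefixCounts,
    pvPrefixCounts, pvPrefixCounts, pvZipSub_eq]
  norm_num [PySem.Set.empty]
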